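-- pv_equiv track=rewrite | github.com/Weismantel/2-associahedra | helper.py | compare_tuples
-- ===== SOURCE A (Python) =====
-- def compare_tuples(tup1, tup2):
--     #Compares list of pairs of integers.
--     if len(tup1) < len(tup2):
--         return -1
--     elif len(tup1) > len(tup2):
--         return 1
--     else:
--         for i in range(len(tup1)):
--             if tup1[i][0] < tup2[i][0]:
--                 return -1
--             elif tup1[i][0] > tup2[i][0]:
--                 return 1
--             else:
--                 if tup1[i][1] < tup2[i][1]:
--                     return -1
--                 elif tup1[i][1] > tup2[i][1]:
--                     return 1
--     return 0
-- ===== SOURCE B (Python) =====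
-- def compare_tuples(tup1, tup2):
--     # B: length priority; then flatten both sides into one flat integer stream
--     # [a0,b0,a1,b1,...] and decide by the first mismatching position of the
--     # flat streams (staged passes instead of a nested per-pair branch loop).
--     if len(tup1) != len(tup2):
--         return (len(tup1) > len(tup2)) - (len(tup1) < len(tup2))
--     flat1 = [x for p in tup1 for x in p]
--     flat2 = [x for p in tup2 for x in p]
--     mism = [i for i in range(len(flat1)) if flat1[i] != flat2[i]]
--     if not mism:
--         return 0
--     k = mism[0]
--     return -1 if flat1[k] < flat2[k] else 1
-- ===== Notes on version B (the rewrite author's own statement) =====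
-- stated objective: alternative
-- what changed: Instead of A's single nested loop branching on first/second pair components, B flattens both lists into flat integer streams, collects all mismatch positions in a staged pass, and decides the sign from the first mismatch (lengths handled up front by a sign formula).
import Mathlib
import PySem

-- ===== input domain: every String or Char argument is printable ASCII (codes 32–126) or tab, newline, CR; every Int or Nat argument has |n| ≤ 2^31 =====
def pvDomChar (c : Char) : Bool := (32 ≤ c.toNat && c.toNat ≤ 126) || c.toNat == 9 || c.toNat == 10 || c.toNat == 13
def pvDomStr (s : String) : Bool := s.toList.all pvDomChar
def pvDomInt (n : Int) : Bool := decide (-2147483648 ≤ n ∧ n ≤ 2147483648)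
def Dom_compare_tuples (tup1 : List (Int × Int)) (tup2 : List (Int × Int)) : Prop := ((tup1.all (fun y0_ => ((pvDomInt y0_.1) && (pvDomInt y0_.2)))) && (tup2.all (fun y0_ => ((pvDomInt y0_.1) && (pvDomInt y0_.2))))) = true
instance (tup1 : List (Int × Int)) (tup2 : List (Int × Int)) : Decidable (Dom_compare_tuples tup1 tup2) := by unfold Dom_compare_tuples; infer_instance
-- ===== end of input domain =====

-- B flattens both lists into flat integer streams and decides by the first mismatch position (lengths handled up front); objective: alternative decomposition, same cost.


-- ===== PORT A =====
-- A's for-loop over indices (lengths already equal), branches in A's order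
def pvLoopA : List (Int × Int) → List (Int × Int) → Int
  | a :: as, b :: bs =>
      if a.1 < b.1 then -1
      else if a.1 > b.1 then 1
      else if a.2 < b.2 then -1
      else if a.2 > b.2 then 1
      else pvLoopA as bs
  | _, _ => 0

def compare_tuples (tup1 : List (Int × Int)) (tup2 : List (Int × Int)) : Int :=
  if tup1.length < tup2.length then -1
  else if tup1.length > tup2.length then 1
  else pvLoopA tup1 tup2

-- ===== PORT B =====
def compare_tuples_alt (tup1 : List (Int × Int)) (tup2 : List (Int × Int)) : Int :=
  if tup1.length ≠ tup2.length then
    (if tup1.length > tup2.length then (1 : Int) else 0) -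
      (if tup1.length < tup2.length then (1 : Int) else 0)
  else
    let flat1 := tup1.flatMap (fun p => [p.1, p.2])
    let flat2 := tup2.flatMap (fun p => [p.1, p.2])
    let mism := (List.range flat1.length).filter (fun i => flat1.getD i 0 != flat2.getD i 0)
    match mism with
    | [] => 0
    | k :: _ => if flat1.getD k 0 < flat2.getD k 0 then -1 else 1

-- ===== PRECONDITION & SPEC =====
def Spec_compare_tuples (tup1 : List (Int × Int)) (tup2 : List (Int × Int)) (out : Int) : Prop := out = compare_tuples_alt tup1 tup2
instance (tup1 : List (Int × Int)) (tup2 : List (Int × Int)) (out : Int) : Decidable (Spec_compare_tuples tup1 tup2 out) := by unfold Spec_compare_tuples; infer_instance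

-- ===== CLAIM (what is proved, stated in full; the proofs are below) =====
def Claim_equal_compare_tuples : Prop := ∀ (tup1 : List (Int × Int)) (tup2 : List (Int × Int)), Dom_compare_tuples tup1 tup2 → Spec_compare_tuples tup1 tup2 (compare_tuples tup1 tup2)

-- ===== LEMMAS AND PROOFS =====
-- first-mismatch comparison on flat streams, as a recursion (proof-side bridge)
def cmpF : List Int → List Int → Int
  | a :: as, b :: bs => if a ≠ b then (if a < b then -1 else 1) else cmpF as bs
  | _, _ => 0

lemma mism_eq_cmpF (l1 l2 : List Int) (h : l1.length = l2.length) :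
    (match (List.range l1.length).filter (fun i => l1.getD i 0 != l2.getD i 0) with
      | [] => (0 : Int)
      | k :: _ => if l1.getD k 0 < l2.getD k 0 then -1 else 1) = cmpF l1 l2 := by
  induction l1 generalizing l2 with
  | nil =>
    cases l2 with
    | nil => simp [cmpF]
    | cons b bs => simp at h
  | cons a as ih =>
    cases l2 with
    | nil => simp at h
    | cons b bs =>
      simp only [List.length_cons, Nat.add_right_cancel_iff] at h
      simp only [List.length_cons, List.range_succ_eq_map, List.filter_cons]
      by_cases hab : a = b
      · have hb : ((a :: as).getD 0 0 != (b :: bs).getD 0 0) = false := by simp [hab]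
        rw [hb]
        simp only [Bool.false_eq_true, if_false, List.filter_map, Function.comp_def,
          List.getD_cons_succ]
        have key := ih bs h
        cases hfe : (List.range as.length).filter (fun i => as.getD i 0 != bs.getD i 0) with
        | nil => simp only [hfe] at key ⊢; simpa [cmpF, hab] using key
        | cons k ks => simp only [hfe] at key ⊢; simpa [cmpF, hab, List.getD_cons_succ] using key
      · have hb : ((a :: as).getD 0 0 != (b :: bs).getD 0 0) = true := by simp [hab]
        rw [hb]
        simp [cmpF, hab]

lemma pvLoopA_eq_cmpF (t1 t2 : List (Int × Int)) :
    pvLoopA t1 t2 = cmpF (t1.flatMap (fun p => [p.1, p.2])) (t2.flatMap (fun p => [p.1, p.2])) := by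
  induction t1 generalizing t2 with
  | nil => cases t2 <;> simp [pvLoopA, cmpF]
  | cons a as ih =>
    cases t2 with
    | nil => simp [pvLoopA, cmpF]
    | cons b bs =>
      simp only [pvLoopA, List.flatMap_cons, List.cons_append, List.nil_append, cmpF]
      rcases lt_trichotomy a.1 b.1 with h | h | h
      · simp [h, ne_of_lt h]
      · rcases lt_trichotomy a.2 b.2 with h2 | h2 | h2
        · simp [h, ne_of_lt h2, h2, not_lt_of_gt, lt_irrefl]
        · simp [h, h2, ih bs, lt_irrefl]
        · simp [h, (ne_of_lt h2).symm, not_lt_of_gt h2]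
          intro h3; exact absurd h3 (not_le.mpr h2)
      · simp [(ne_of_lt h).symm, not_lt_of_gt h]
        intro h3; exact absurd h3 (not_le.mpr h)

-- ===== VERDICT (by name: the statement is the Claim_ definition above) =====
theorem compare_tuples_spec : Claim_equal_compare_tuples := by
  intro t1 t2 _
  unfold Spec_compare_tuples compare_tuples compare_tuples_alt
  rcases lt_trichotomy t1.length t2.length with h | h | h
  · simp [h, Nat.ne_of_lt h, Nat.lt_asymm h]
  · rw [if_neg (by omega : ¬ t1.length < t2.length), if_neg (by omega : ¬ t1.length > t2.length),
      if_neg (by omega : ¬ t1.length ≠ t2.length)]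
    exact (pvLoopA_eq_cmpF t1 t2).trans (mism_eq_cmpF _ _ (by simpa using h)).symm
  · simp [Nat.lt_asymm h, h, (Nat.ne_of_lt h).symm]
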